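-- pv_equiv track=rewrite | github.com/Abhigna-Devarasetty/Raichu-Board-Game-Strategy-and-Naive-Bayes-Text-Classifier | raichu.py | heuristic_function_2
-- ===== SOURCE A (Python) =====
-- import math
--
-- def heuristic_function_2(board):
--
--     wp=0
--     wP=0
--     bp=0
--     bP=0
--     N = len(board)
--
--     for i in range(N):
--         for j in range(N):
--
--             if board[i][j]=='w':
--                 wp += math.floor(N/2) - math.ceil((N-i-1)/2) +1
--             elif board[i][j]=='b':
--                 bp += math.floor(N/2) - math.ceil(i/2) +1
--             elif board[i][j]=='W':
--                 wP += math.ceil(N/3) - math.ceil((N-i-1)/3) +1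
--             elif board[i][j]=='B':
--                 bP += math.ceil(N/3) - math.ceil(i/3) +1
--
--     return (wp+wP-bp-bP)
-- ===== SOURCE B (Python) =====
-- def _tally_row(row, n):
--     cells = [row[j] for j in range(n)]
--     return [cells.count(c) for c in 'wWbB']
--
-- def heuristic_function_2(board):
--     N = len(board)
--     # stage 1: per-row tally of the four piece kinds
--     tally = [_tally_row(row, N) for row in board]
--     total = 0
--     # stage 2a: white pieces, sweeping rows bottom-up; weights start at their
--     # bottom-row values and decrease by modular recurrences (no division per row)
--     ws = N // 2 + 1
--     wb = (N + 2) // 3 + 1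
--     for m in range(N):
--         ws -= m % 2
--         wb -= 1 if m % 3 == 1 else 0
--         i = N - 1 - m
--         total += ws * tally[i][0] + wb * tally[i][1]
--     # stage 2b: black pieces, sweeping rows top-down with the same recurrences
--     bs = N // 2 + 1
--     bb = (N + 2) // 3 + 1
--     for i in range(N):
--         bs -= i % 2
--         bb -= 1 if i % 3 == 1 else 0
--         total -= bs * tally[i][2] + bb * tally[i][3]
--     return total
-- ===== Notes on version B (the rewrite author's own statement) =====
-- stated objective: alternative
-- what changed: B replaces A's per-cell nested scan (computing a floor/ceil weight for every cell) by two stages: first a per-row tally of the four piece kinds, then two opposite-direction sweeps (bottom-up for white, top-down for black) that maintain the weights by modular-increment recurrences, so no floor/ceil arithmetic is done per row at all.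
import Mathlib
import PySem

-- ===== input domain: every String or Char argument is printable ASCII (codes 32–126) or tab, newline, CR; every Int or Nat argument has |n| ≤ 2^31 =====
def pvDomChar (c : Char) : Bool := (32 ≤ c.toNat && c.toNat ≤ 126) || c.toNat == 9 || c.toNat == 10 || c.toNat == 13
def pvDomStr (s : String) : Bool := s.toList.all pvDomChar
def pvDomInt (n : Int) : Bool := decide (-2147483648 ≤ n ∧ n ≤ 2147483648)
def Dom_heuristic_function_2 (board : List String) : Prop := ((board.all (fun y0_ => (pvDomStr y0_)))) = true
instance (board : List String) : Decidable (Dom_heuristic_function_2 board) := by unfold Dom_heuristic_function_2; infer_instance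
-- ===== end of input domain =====

-- B re-decomposes A's per-cell weighted scan into a per-row tally pass followed by two
-- opposite-direction sweeps that maintain the row weights by modular-increment recurrences.


-- ===== PORT A =====
-- math.floor(N/2) is exact integer floor division here; math.ceil(x/k) (x ≥ 0 in every use)
-- is ported exactly as -((-x) // k). board[i][j] is pyGetD (in range under Pre_).
def heuristic_function_2 (board : List String) : Int :=
  let N : Int := board.length
  let s :=
    (PySem.List.pyRange 0 N 1).foldl (fun (st : Int × Int × Int × Int) i =>
      (PySem.List.pyRange 0 N 1).foldl (fun (st : Int × Int × Int × Int) j =>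
        let c := PySem.List.pyGetD (PySem.List.pyGetD board i "").toList j ' '
        if c = 'w' then
          (st.1 + (PySem.Int.floordiv N 2 - (-PySem.Int.floordiv (-(N - i - 1)) 2) + 1), st.2.1, st.2.2.1, st.2.2.2)
        else if c = 'b' then
          (st.1, st.2.1, st.2.2.1 + (PySem.Int.floordiv N 2 - (-PySem.Int.floordiv (-i) 2) + 1), st.2.2.2)
        else if c = 'W' then
          (st.1, st.2.1 + ((-PySem.Int.floordiv (-N) 3) - (-PySem.Int.floordiv (-(N - i - 1)) 3) + 1), st.2.2.1, st.2.2.2)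
        else if c = 'B' then
          (st.1, st.2.1, st.2.2.1, st.2.2.2 + ((-PySem.Int.floordiv (-N) 3) - (-PySem.Int.floordiv (-i) 3) + 1))
        else st) st) ((0, 0, 0, 0) : Int × Int × Int × Int)
  s.1 + s.2.1 - s.2.2.1 - s.2.2.2

-- ===== PORT B =====
-- stage 1: per-row tally of 'w','W','b','B'; stage 2a: white pieces bottom-up with
-- modular-increment weights; stage 2b: black pieces top-down with the same recurrences.
def tally_row (row : String) (n : Int) : List Int :=
  let cells := (PySem.List.pyRange 0 n 1).map (fun j => PySem.List.pyGetD row.toList j ' ')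
  "wWbB".toList.map (fun c => (cells.count c : Int))

def heuristic_function_2_alt (board : List String) : Int :=
  let N : Int := board.length
  let tally : List (List Int) :=
    board.map (fun row => tally_row row N)
  let s1 :=
    (PySem.List.pyRange 0 N 1).foldl (fun (st : Int × Int × Int) m =>
      let ws := st.1 - PySem.Int.mod m 2
      let wb := st.2.1 - (if PySem.Int.mod m 3 = 1 then (1 : Int) else 0)
      let i := N - 1 - m
      (ws, wb, st.2.2 + ws * PySem.List.pyGetD (PySem.List.pyGetD tally i []) 0 0
                      + wb * PySem.List.pyGetD (PySem.List.pyGetD tally i []) 1 0))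
      (PySem.Int.floordiv N 2 + 1, PySem.Int.floordiv (N + 2) 3 + 1, 0)
  let s2 :=
    (PySem.List.pyRange 0 N 1).foldl (fun (st : Int × Int × Int) i =>
      let bs := st.1 - PySem.Int.mod i 2
      let bb := st.2.1 - (if PySem.Int.mod i 3 = 1 then (1 : Int) else 0)
      (bs, bb, st.2.2 - bs * PySem.List.pyGetD (PySem.List.pyGetD tally i []) 2 0
                      - bb * PySem.List.pyGetD (PySem.List.pyGetD tally i []) 3 0))
      (PySem.Int.floordiv N 2 + 1, PySem.Int.floordiv (N + 2) 3 + 1, s1.2.2)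
  s2.2.2

-- ===== PRECONDITION & SPEC =====
-- Pre_ excludes exactly the inputs where A raises IndexError: some row shorter than the board.
def Pre_heuristic_function_2 (board : List String) : Prop :=
  ∀ s ∈ board, board.length ≤ s.length
instance (board : List String) : Decidable (Pre_heuristic_function_2 board) := by
  unfold Pre_heuristic_function_2; infer_instance
def pvWitness_heuristic_function_2 : List String := ["wB", ".b"]
def Spec_heuristic_function_2 (board : List String) (out : Int) : Prop := out = heuristic_function_2_alt board
instance (board : List String) (out : Int) : Decidable (Spec_heuristic_function_2 board out) := by unfold Spec_heuristic_function_2; infer_instance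

-- ===== CLAIM (what is proved, stated in full; the proofs are below) =====
def Claim_equal_heuristic_function_2 : Prop := ∀ (board : List String), Dom_heuristic_function_2 board → Pre_heuristic_function_2 board → Spec_heuristic_function_2 board (heuristic_function_2 board)

-- ===== LEMMAS AND PROOFS =====

-- a fold over range(n) reading l[j] is a fold over the first n characters
theorem pvRangeFold {S : Type} (l : List Char) (n : Nat)
    (f : S → Char → S) (hid : ∀ st, f st ' ' = st) (st : S) :
    (PySem.List.pyRange 0 (n : Int) 1).foldl (fun st j => f st (PySem.List.pyGetD l j ' ')) st
      = (l.take n).foldl f st := by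
  induction n generalizing st with
  | zero => simp [PySem.List.pyRange_one_eq_nil]
  | succ m ih =>
    have hcast : ((m + 1 : Nat) : Int) = (m : Int) + 1 := by push_cast; ring
    rw [hcast, PySem.List.pyRange_one_succ_right (by positivity), List.foldl_append, ih]
    by_cases hm : m < l.length
    · rw [List.take_add_one, List.foldl_append]
      simp [List.getElem?_eq_getElem hm]
    · have h1 : PySem.List.pyGetD l (m : Int) ' ' = ' ' := by
        apply PySem.List.pyGetD_of_none
        simp [PySem.List.pyGet?, PySem.List.pyIdx?]
        omega
      have h2 : l.take (m + 1) = l.take m := by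
        rw [List.take_of_length_le (by omega), List.take_of_length_le (by omega)]
      simp [h1, h2, hid]

-- A's inner branch accumulation over a char list, expressed with counts
theorem pvInnerCount (l : List Char) (a b c d : Int) (st : Int × Int × Int × Int) :
    l.foldl (fun (st : Int × Int × Int × Int) ch =>
      if ch = 'w' then (st.1 + a, st.2.1, st.2.2.1, st.2.2.2)
      else if ch = 'b' then (st.1, st.2.1, st.2.2.1 + b, st.2.2.2)
      else if ch = 'W' then (st.1, st.2.1 + c, st.2.2.1, st.2.2.2)
      else if ch = 'B' then (st.1, st.2.1, st.2.2.1, st.2.2.2 + d)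
      else st) st
    = (st.1 + a * l.count 'w', st.2.1 + c * l.count 'W',
       st.2.2.1 + b * l.count 'b', st.2.2.2 + d * l.count 'B') := by
  induction l generalizing st with
  | nil => simp
  | cons x t ih =>
    simp only [List.foldl_cons, List.count_cons, ih]
    clear ih
    obtain ⟨wp, wP, bp, bP⟩ := st
    by_cases h1 : x = 'w'
    · subst h1; norm_num; ring
    · by_cases h2 : x = 'b'
      · subst h2; norm_num; push_cast; refine ⟨rfl, rfl, by ring, rfl⟩
      · by_cases h3 : x = 'W'
        · subst h3; norm_num; push_cast; refine ⟨rfl, by ring, rfl, rfl⟩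
        · by_cases h4 : x = 'B'
          · subst h4; norm_num; push_cast; refine ⟨rfl, rfl, rfl, by ring⟩
          · simp [h1, h2, h3, h4]

-- the per-row contribution of row i, as summed by both programs
def pvContrib (board : List String) (i : Int) : Int :=
  let N : Int := board.length
  let l := (PySem.List.pyGetD board i "").toList.take board.length
  (PySem.Int.floordiv N 2 - (-PySem.Int.floordiv (-(N - i - 1)) 2) + 1) * (l.count 'w' : Int)
  + ((-PySem.Int.floordiv (-N) 3) - (-PySem.Int.floordiv (-(N - i - 1)) 3) + 1) * (l.count 'W' : Int)
  - (PySem.Int.floordiv N 2 - (-PySem.Int.floordiv (-i) 2) + 1) * (l.count 'b' : Int)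
  - ((-PySem.Int.floordiv (-N) 3) - (-PySem.Int.floordiv (-i) 3) + 1) * (l.count 'B' : Int)

-- A's outer step, after the inner loop is expressed through counts
def pvStep (board : List String) (st : Int × Int × Int × Int) (i : Int) : Int × Int × Int × Int :=
  let N : Int := board.length
  let l := (PySem.List.pyGetD board i "").toList.take board.length
  (st.1 + (PySem.Int.floordiv N 2 - (-PySem.Int.floordiv (-(N - i - 1)) 2) + 1) * (l.count 'w' : Int),
   st.2.1 + ((-PySem.Int.floordiv (-N) 3) - (-PySem.Int.floordiv (-(N - i - 1)) 3) + 1) * (l.count 'W' : Int),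
   st.2.2.1 + (PySem.Int.floordiv N 2 - (-PySem.Int.floordiv (-i) 2) + 1) * (l.count 'b' : Int),
   st.2.2.2 + ((-PySem.Int.floordiv (-N) 3) - (-PySem.Int.floordiv (-i) 3) + 1) * (l.count 'B' : Int))

-- A equals the sum of per-row contributions
theorem pvA_eq_sum (board : List String) :
    heuristic_function_2 board
      = ((PySem.List.pyRange 0 (board.length : Int) 1).map (pvContrib board)).sum := by
  unfold heuristic_function_2
  simp only []
  have hagree : ∀ (acc : Int × Int × Int × Int),
      ∀ i ∈ PySem.List.pyRange 0 (board.length : Int) 1,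
      (PySem.List.pyRange 0 (board.length : Int) 1).foldl
        (fun (st : Int × Int × Int × Int) j =>
          let c := PySem.List.pyGetD (PySem.List.pyGetD board i "").toList j ' '
          if c = 'w' then
            (st.1 + (PySem.Int.floordiv (board.length : Int) 2 - (-PySem.Int.floordiv (-((board.length : Int) - i - 1)) 2) + 1), st.2.1, st.2.2.1, st.2.2.2)
          else if c = 'b' then
            (st.1, st.2.1, st.2.2.1 + (PySem.Int.floordiv (board.length : Int) 2 - (-PySem.Int.floordiv (-i) 2) + 1), st.2.2.2)
          else if c = 'W' then
            (st.1, st.2.1 + ((-PySem.Int.floordiv (-(board.length : Int)) 3) - (-PySem.Int.floordiv (-((board.length : Int) - i - 1)) 3) + 1), st.2.2.1, st.2.2.2)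
          else if c = 'B' then
            (st.1, st.2.1, st.2.2.1, st.2.2.2 + ((-PySem.Int.floordiv (-(board.length : Int)) 3) - (-PySem.Int.floordiv (-i) 3) + 1))
          else st) acc = pvStep board acc i := by
    intro acc i hi
    obtain ⟨h0, hN⟩ := (PySem.List.mem_pyRange_one).mp hi
    have hilt : i.toNat < board.length := by omega
    have hrow : PySem.List.pyGetD board i "" = board[i.toNat] :=
      PySem.List.pyGetD_eq_getElem _ _ h0 (by exact_mod_cast hN)
    rw [hrow]
    rw [pvRangeFold (board[i.toNat]).toList board.length
      (fun (st : Int × Int × Int × Int) ch =>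
        if ch = 'w' then
          (st.1 + (PySem.Int.floordiv (board.length : Int) 2 - (-PySem.Int.floordiv (-((board.length : Int) - i - 1)) 2) + 1), st.2.1, st.2.2.1, st.2.2.2)
        else if ch = 'b' then
          (st.1, st.2.1, st.2.2.1 + (PySem.Int.floordiv (board.length : Int) 2 - (-PySem.Int.floordiv (-i) 2) + 1), st.2.2.2)
        else if ch = 'W' then
          (st.1, st.2.1 + ((-PySem.Int.floordiv (-(board.length : Int)) 3) - (-PySem.Int.floordiv (-((board.length : Int) - i - 1)) 3) + 1), st.2.2.1, st.2.2.2)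
        else if ch = 'B' then
          (st.1, st.2.1, st.2.2.1, st.2.2.2 + ((-PySem.Int.floordiv (-(board.length : Int)) 3) - (-PySem.Int.floordiv (-i) 3) + 1))
        else st) (by intro st; rfl) acc]
    rw [pvInnerCount]
    simp [pvStep, hrow]
  rw [PySem.List.foldl_congr_mem _ _ (pvStep board) _ hagree]
  have hhom := List.foldl_hom (fun st : Int × Int × Int × Int => st.1 + st.2.1 - st.2.2.1 - st.2.2.2)
    (g₁ := pvStep board) (g₂ := fun acc i => acc + pvContrib board i)
    (l := PySem.List.pyRange 0 (board.length : Int) 1) (init := ((0, 0, 0, 0) : Int × Int × Int × Int))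
    (by intro st i; simp only [pvStep, pvContrib]; ring)
  simp only [] at hhom
  rw [← hhom, PySem.List.foldl_add]
  norm_num

-- closed forms of the swept weights: after processing m the small weight is
-- half - ceil(m/2) and the big weight is third - ceil(m/3)
def pvW (half : Int) (m : Nat) : Int := half - (((m + 1) / 2 : Nat) : Int)
def pvV (third : Int) (m : Nat) : Int := third - (((m + 2) / 3 : Nat) : Int)

-- the weight-sweep fold of B, in closed form
theorem pvWeightFold (half third : Int) (f g : Int → Int) (n : Nat) (t0 : Int) :
    (PySem.List.pyRange 0 (n : Int) 1).foldl
      (fun (st : Int × Int × Int) m =>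
        (st.1 - PySem.Int.mod m 2,
         st.2.1 - (if PySem.Int.mod m 3 = 1 then (1 : Int) else 0),
         st.2.2 + (st.1 - PySem.Int.mod m 2) * f m
                + (st.2.1 - (if PySem.Int.mod m 3 = 1 then (1 : Int) else 0)) * g m))
      (half, third, t0)
    = (pvW half (n - 1), pvV third (n - 1),
       t0 + ((PySem.List.pyRange 0 (n : Int) 1).map
         (fun m => pvW half m.toNat * f m + pvV third m.toNat * g m)).sum) := by
  induction n with
  | zero => simp [PySem.List.pyRange_one_eq_nil, pvW, pvV]
  | succ k ih =>
    have hcast : ((k + 1 : Nat) : Int) = (k : Int) + 1 := by push_cast; ring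
    rw [hcast, PySem.List.pyRange_one_succ_right (by positivity), List.foldl_append,
      List.map_append, List.sum_append, ih]
    simp only [List.foldl_cons, List.foldl_nil, List.map_cons, List.map_nil, List.sum_cons,
      List.sum_nil, Int.toNat_natCast]
    have hmod2 : PySem.Int.mod (k : Int) 2 = ((k % 2 : Nat) : Int) := by
      exact_mod_cast PySem.Int.mod_natCast k 2
    have hmod3 : PySem.Int.mod (k : Int) 3 = ((k % 3 : Nat) : Int) := by
      exact_mod_cast PySem.Int.mod_natCast k 3
    have hW : pvW half (k - 1) - PySem.Int.mod (k : Int) 2 = pvW half k := by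
      rw [hmod2]; unfold pvW; push_cast [Int.natCast_div]
      have h2 : ((k - 1 + 1) / 2 : Nat) + k % 2 = (k + 1) / 2 := by omega
      omega
    have hV : pvV third (k - 1) - (if PySem.Int.mod (k : Int) 3 = 1 then (1 : Int) else 0)
        = pvV third k := by
      rw [hmod3]; unfold pvV
      by_cases h3 : k % 3 = 1
      · simp only [h3]; norm_num
        have : ((k - 1 + 2) / 3 : Nat) + 1 = (k + 2) / 3 := by omega
        omega
      · have hne : ((k % 3 : Nat) : Int) ≠ 1 := by exact_mod_cast h3
        simp only [if_neg hne]
        have : ((k - 1 + 2) / 3 : Nat) = (k + 2) / 3 := by omega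
        omega
    refine Prod.ext ?_ (Prod.ext ?_ ?_)
    · simpa using hW
    · simpa using hV
    · simp only []
      rw [hW, hV]; ring

-- a sum over range(n) read back-to-front is the same sum
theorem pvSumRev (n : Nat) (h : Int → Int) :
    ((PySem.List.pyRange 0 (n : Int) 1).map (fun m => h ((n : Int) - 1 - m))).sum
      = ((PySem.List.pyRange 0 (n : Int) 1).map h).sum := by
  have hrev : (PySem.List.pyRange 0 (n : Int) 1).map (fun m => h ((n : Int) - 1 - m))
      = ((PySem.List.pyRange 0 (n : Int) 1).map h).reverse := by
    apply List.ext_getElem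
    · simp
    · intro k h1 h2
      have hk : k < n := by simpa [PySem.List.length_pyRange_one] using h1
      have hl : ((PySem.List.pyRange 0 (n : Int) 1).map h).length = n := by
        simp [PySem.List.length_pyRange_one]
      rw [List.getElem_reverse]
      simp only [List.getElem_map, PySem.List.getElem_pyRange_one, hl]
      congr 1
      omega
  rw [hrev, List.sum_reverse]

-- the tally lookup of B: piece kind j of row i
def pvT (board : List String) (i j : Int) : Int :=
  PySem.List.pyGetD
    (PySem.List.pyGetD (board.map (fun row => tally_row row (board.length : Int))) i []) j 0

-- reading row[j] for j in range(n) is taking the first n characters (n within bounds)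
theorem pvRangeMap (l : List Char) (n : Nat) (h : n ≤ l.length) :
    (PySem.List.pyRange 0 (n : Int) 1).map (fun j => PySem.List.pyGetD l j ' ') = l.take n := by
  induction n with
  | zero => simp [PySem.List.pyRange_one_eq_nil]
  | succ m ih =>
    have hm : m < l.length := by omega
    have hcast : ((m + 1 : Nat) : Int) = (m : Int) + 1 := by push_cast; ring
    rw [hcast, PySem.List.pyRange_one_succ_right (by positivity), List.map_append,
      ih (by omega), List.take_add_one]
    simp [List.getElem?_eq_getElem hm]

-- the tally row of B at a valid index, as counts over the truncated row
theorem pvTallyRow (board : List String) (hpre : Pre_heuristic_function_2 board)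
    (k : Nat) (hk : k < board.length) :
    PySem.List.pyGetD (board.map (fun row => tally_row row (board.length : Int))) (k : Int) []
    = "wWbB".toList.map
        (fun c => ((board[k].toList.take board.length).count c : Int)) := by
  rw [PySem.List.pyGetD_eq_getElem _ _ (by positivity) (by simpa using hk)]
  simp only [Int.toNat_natCast, List.getElem_map]
  unfold tally_row
  simp only []
  rw [pvRangeMap _ _ (by simpa using hpre board[k] (List.getElem_mem hk))]

-- B in closed form: the two sweeps as sums over rows
theorem pvB_eq_sum (board : List String) :
    heuristic_function_2_alt board
      = ((PySem.List.pyRange 0 (board.length : Int) 1).map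
          (fun m => pvW (PySem.Int.floordiv (board.length : Int) 2 + 1) m.toNat
                      * pvT board ((board.length : Int) - 1 - m) 0
                  + pvV (PySem.Int.floordiv ((board.length : Int) + 2) 3 + 1) m.toNat
                      * pvT board ((board.length : Int) - 1 - m) 1)).sum
        + ((PySem.List.pyRange 0 (board.length : Int) 1).map
          (fun i => pvW (PySem.Int.floordiv (board.length : Int) 2 + 1) i.toNat
                      * (-(pvT board i 2))
                  + pvV (PySem.Int.floordiv ((board.length : Int) + 2) 3 + 1) i.toNat
                      * (-(pvT board i 3)))).sum := by
  unfold heuristic_function_2_alt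
  simp only [pvT]
  set tl := board.map (fun row => tally_row row (board.length : Int)) with htl
  rw [pvWeightFold (PySem.Int.floordiv (board.length : Int) 2 + 1)
    (PySem.Int.floordiv ((board.length : Int) + 2) 3 + 1) _ _ board.length 0]
  rw [PySem.List.foldl_congr_mem _ _
    (fun (st : Int × Int × Int) i =>
      (st.1 - PySem.Int.mod i 2,
       st.2.1 - (if PySem.Int.mod i 3 = 1 then (1 : Int) else 0),
       st.2.2 + (st.1 - PySem.Int.mod i 2) * (-(PySem.List.pyGetD (PySem.List.pyGetD tl i []) 2 0))
              + (st.2.1 - (if PySem.Int.mod i 3 = 1 then (1 : Int) else 0))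
                  * (-(PySem.List.pyGetD (PySem.List.pyGetD tl i []) 3 0)))) _
    (by intro acc x _; refine Prod.ext rfl (Prod.ext rfl ?_); simp only []; ring)]
  rw [pvWeightFold (PySem.Int.floordiv (board.length : Int) 2 + 1)
    (PySem.Int.floordiv ((board.length : Int) + 2) 3 + 1) _ _ board.length _]
  simp only [zero_add]

-- per-row agreement of the two closed forms: ceilings vs Nat-division weights
theorem pvPointwise (board : List String) (hpre : Pre_heuristic_function_2 board)
    (k : Nat) (hk : k < board.length) :
    pvContrib board (k : Int)
      = (pvW (PySem.Int.floordiv (board.length : Int) 2 + 1)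
            ((board.length : Int) - 1 - (k : Int)).toNat
          * pvT board ((board.length : Int) - 1 - ((board.length : Int) - 1 - (k : Int))) 0
        + pvV (PySem.Int.floordiv ((board.length : Int) + 2) 3 + 1)
            ((board.length : Int) - 1 - (k : Int)).toNat
          * pvT board ((board.length : Int) - 1 - ((board.length : Int) - 1 - (k : Int))) 1)
        + (pvW (PySem.Int.floordiv (board.length : Int) 2 + 1) (k : Int).toNat
            * (-(pvT board (k : Int) 2))
          + pvV (PySem.Int.floordiv ((board.length : Int) + 2) 3 + 1) (k : Int).toNat
            * (-(pvT board (k : Int) 3))) := by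
  have hidx : (board.length : Int) - 1 - ((board.length : Int) - 1 - (k : Int)) = (k : Int) := by
    ring
  have htn : ((board.length : Int) - 1 - (k : Int)).toNat = board.length - 1 - k := by omega
  have hrow : PySem.List.pyGetD board (k : Int) "" = board[k] := by
    simp [List.getD_eq_getElem?_getD, List.getElem?_eq_getElem hk]
  have hT : ∀ j : Int, pvT board (k : Int) j
      = PySem.List.pyGetD
          ("wWbB".toList.map (fun c => ((board[k].toList.take board.length).count c : Int)))
          j 0 := by
    intro j; unfold pvT; rw [pvTallyRow board hpre k hk]
  have g0 : ∀ (a b c d : Int), PySem.List.pyGetD [a, b, c, d] 0 0 = a := by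
    intros; rfl
  have g1 : ∀ (a b c d : Int), PySem.List.pyGetD [a, b, c, d] 1 0 = b := by
    intros; rfl
  have g2 : ∀ (a b c d : Int), PySem.List.pyGetD [a, b, c, d] 2 0 = c := by
    intros; rfl
  have g3 : ∀ (a b c d : Int), PySem.List.pyGetD [a, b, c, d] 3 0 = d := by
    intros; rfl
  have hchars : "wWbB".toList = ['w', 'W', 'b', 'B'] := rfl
  have hfd2 : PySem.Int.floordiv (board.length : Int) 2 = ((board.length / 2 : Nat) : Int) := by
    exact_mod_cast PySem.Int.floordiv_natCast board.length 2
  have hfd3 : PySem.Int.floordiv ((board.length : Int) + 2) 3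
      = (((board.length + 2) / 3 : Nat) : Int) := by
    have := PySem.Int.floordiv_natCast (board.length + 2) 3
    push_cast at this; exact_mod_cast this
  have hc1 : -PySem.Int.floordiv (-((board.length : Int) - (k : Int) - 1)) 2
      = (((board.length - k) / 2 : Nat) : Int) :=
    (PySem.Int.neg_floordiv_neg_eq_iff_of_pos (by norm_num)).mpr (by constructor <;> omega)
  have hc2 : -PySem.Int.floordiv (-(k : Int)) 2 = (((k + 1) / 2 : Nat) : Int) :=
    (PySem.Int.neg_floordiv_neg_eq_iff_of_pos (by norm_num)).mpr (by constructor <;> omega)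
  have hc3 : -PySem.Int.floordiv (-((board.length : Int))) 3
      = (((board.length + 2) / 3 : Nat) : Int) :=
    (PySem.Int.neg_floordiv_neg_eq_iff_of_pos (by norm_num)).mpr (by constructor <;> omega)
  have hc4 : -PySem.Int.floordiv (-((board.length : Int) - (k : Int) - 1)) 3
      = (((board.length - k + 1) / 3 : Nat) : Int) :=
    (PySem.Int.neg_floordiv_neg_eq_iff_of_pos (by norm_num)).mpr (by constructor <;> omega)
  have hc5 : -PySem.Int.floordiv (-(k : Int)) 3 = (((k + 2) / 3 : Nat) : Int) :=
    (PySem.Int.neg_floordiv_neg_eq_iff_of_pos (by norm_num)).mpr (by constructor <;> omega)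
  rw [hidx]
  unfold pvContrib
  simp only [hrow, hT, hchars, List.map_cons, List.map_nil, htn, Int.toNat_natCast, g0, g1, g2, g3]
  rw [hfd2, hfd3, hc1, hc2, hc3, hc4, hc5]
  unfold pvW pvV
  have e1 : ((board.length - 1 - k + 1) / 2 : Nat) = ((board.length - k) / 2 : Nat) := by omega
  have e2 : ((board.length - 1 - k + 2) / 3 : Nat) = ((board.length - k + 1) / 3 : Nat) := by omega
  rw [e1, e2]
  ring

theorem heuristic_function_2_spec : Claim_equal_heuristic_function_2 := by
  intro board _ hpre
  unfold Spec_heuristic_function_2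
  rw [pvA_eq_sum board, pvB_eq_sum board]
  rw [← pvSumRev board.length
    (fun m => pvW (PySem.Int.floordiv (board.length : Int) 2 + 1) m.toNat
        * pvT board ((board.length : Int) - 1 - m) 0
      + pvV (PySem.Int.floordiv ((board.length : Int) + 2) 3 + 1) m.toNat
        * pvT board ((board.length : Int) - 1 - m) 1)]
  rw [← PySem.List.sum_map_add_int]
  refine congrArg List.sum (List.map_congr_left ?_)
  intro i hi
  obtain ⟨h0, hN⟩ := PySem.List.mem_pyRange_one.mp hi
  have hk : i.toNat < board.length := by omega
  have hik : i = (i.toNat : Int) := by omega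
  rw [hik]
  exact pvPointwise board hpre i.toNat hk
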